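-- pv_equiv track=rewrite | github.com/bnzone/advent-of-code-2021 | day-3.py | ones_zeros_winner_oxygen
-- ===== SOURCE A (Python) =====
-- def filter_stuff(winner, idx, lst):
--     """
--     - Takes in a list, an index and a winner ('1' or '0').
--     - Filters the list so it only has the winners
--     """
--     return list(filter(lambda row: row[idx] == winner, lst))
--
-- def ones_zeros_winner_oxygen(lst, INDEX):
--     """
--      - Takes in a list and an index where to look (column)
--      - Finds the winner in the specified index ('1' or '0')
--      - After it finds the winner -> call a filter functions at
--         gives it the list to filter, who is the winner, and at what index
--         to filter
--     """
--     max_idx = len(lst[0]) - 1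
--     if INDEX > max_idx:
--         return []
--     ones = 0
--     zeros = 0
--
--     for row in lst:
--         if row[INDEX] == '1':
--             ones += 1
--         else:
--             zeros += 1
--     # Finding the winner by comparing number of 1s and 0s
--     winner = None
--     if ones < zeros:
--         winner = '0'
--     else:
--         winner = '1'
--     result = filter_stuff(winner, INDEX, lst)
--     return result
-- ===== SOURCE B (Python) =====
-- def ones_zeros_winner_oxygen(lst, INDEX):
--     # One pass: partition rows into a '1'-bucket and a '0'-bucket, then
--     # return the '1'-bucket when '1's make up at least half of all rows.
--     if INDEX > len(lst[0]) - 1: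
--         return []
--     ones = []
--     zeros = []
--     for row in lst:
--         c = row[INDEX]
--         if c == '1':
--             ones.append(row)
--         elif c == '0':
--             zeros.append(row)
--     if 2 * len(ones) >= len(lst):
--         return ones
--     return zeros
-- ===== Notes on version B (the rewrite author's own statement) =====
-- stated objective: simpler
-- what changed: B partitions the rows into a '1'-bucket and a '0'-bucket in a single pass and returns the '1'-bucket iff the ones are at least half of all rows (2*ones >= n), replacing A's count pass, explicit zeros counter and separate filter-helper pass.
import Mathlib
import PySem

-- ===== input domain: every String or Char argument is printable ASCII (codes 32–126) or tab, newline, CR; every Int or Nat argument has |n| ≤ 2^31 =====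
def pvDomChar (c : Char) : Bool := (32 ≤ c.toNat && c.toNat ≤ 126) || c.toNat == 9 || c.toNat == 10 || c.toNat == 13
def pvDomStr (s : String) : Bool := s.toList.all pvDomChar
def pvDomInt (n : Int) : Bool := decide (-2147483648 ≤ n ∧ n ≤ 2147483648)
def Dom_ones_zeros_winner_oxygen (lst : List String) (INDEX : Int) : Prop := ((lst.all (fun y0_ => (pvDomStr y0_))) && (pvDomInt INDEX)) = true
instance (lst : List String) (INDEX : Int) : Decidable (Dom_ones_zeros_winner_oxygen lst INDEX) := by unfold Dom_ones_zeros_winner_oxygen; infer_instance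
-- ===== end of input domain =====

-- B partitions the rows into a '1'-bucket and a '0'-bucket in one pass and
-- returns the '1'-bucket iff the ones are at least half of all rows,
-- replacing A's count-then-filter with its helper (objective: simpler).

-- ===== PORT A =====
def filter_stuff (winner : Char) (idx : Int) (lst : List String) : List String :=
  lst.filter (fun row => PySem.Str.pyGet? row idx == some winner)

def ones_zeros_winner_oxygen (lst : List String) (INDEX : Int) : List String :=
  match lst.head? with
  | none => []  -- Python raises IndexError on an empty list (excluded by Pre_)
  | some h =>
    -- max_idx = len(lst[0]) - 1
    if INDEX > PySem.Str.len h - 1 then []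
    else
      let cnt := lst.foldl (fun (acc : Int × Int) row =>
        if PySem.Str.pyGet? row INDEX == some '1' then (acc.1 + 1, acc.2)
        else (acc.1, acc.2 + 1)) (0, 0)
      let winner : Char := if cnt.1 < cnt.2 then '0' else '1'
      filter_stuff winner INDEX lst

-- ===== PORT B =====
def ones_zeros_winner_oxygen_alt (lst : List String) (INDEX : Int) : List String :=
  match lst.head? with
  | none => []  -- Python raises IndexError on an empty list (excluded by Pre_)
  | some h =>
    if INDEX > PySem.Str.len h - 1 then []
    else
      let st := lst.foldl (fun (acc : List String × List String) row =>
        if PySem.Str.pyGet? row INDEX == some '1' then (acc.1 ++ [row], acc.2)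
        else if PySem.Str.pyGet? row INDEX == some '0' then (acc.1, acc.2 ++ [row])
        else acc) ([], [])
      if 2 * st.1.length ≥ lst.length then st.1 else st.2

-- ===== PRECONDITION & SPEC =====
-- Pre_ excludes exactly where Python A raises IndexError: the empty list, and
-- (when the early return is not taken) any row whose INDEX-th character does not exist.
def Pre_ones_zeros_winner_oxygen (lst : List String) (INDEX : Int) : Prop :=
  lst ≠ [] ∧
  (INDEX ≤ PySem.Str.len (lst.headD "") - 1 →
    ∀ row ∈ lst, PySem.Raise.InRange row.length INDEX)
instance (lst : List String) (INDEX : Int) : Decidable (Pre_ones_zeros_winner_oxygen lst INDEX) := by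
  unfold Pre_ones_zeros_winner_oxygen; infer_instance

def pvWitness_ones_zeros_winner_oxygen : List String × Int := (["101", "011", "110"], 1)

def Spec_ones_zeros_winner_oxygen (lst : List String) (INDEX : Int) (out : List String) : Prop := out = ones_zeros_winner_oxygen_alt lst INDEX
instance (lst : List String) (INDEX : Int) (out : List String) : Decidable (Spec_ones_zeros_winner_oxygen lst INDEX out) := by unfold Spec_ones_zeros_winner_oxygen; infer_instance

-- ===== CLAIM (what is proved, stated in full; the proofs are below) =====
def Claim_equal_ones_zeros_winner_oxygen : Prop := ∀ (lst : List String) (INDEX : Int), Dom_ones_zeros_winner_oxygen lst INDEX → Pre_ones_zeros_winner_oxygen lst INDEX → Spec_ones_zeros_winner_oxygen lst INDEX (ones_zeros_winner_oxygen lst INDEX)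

-- ===== LEMMAS AND PROOFS =====

-- A's counting loop: ones counts the hits of p, zeros counts the rest.
theorem foldA_gen (p : String → Bool) (l : List String) (o z : Int) :
    l.foldl (fun (acc : Int × Int) row =>
        if p row then (acc.1 + 1, acc.2) else (acc.1, acc.2 + 1)) (o, z)
    = (o + (l.countP p : Int), z + (l.countP (fun r => !(p r)) : Int)) := by
  induction l generalizing o z with
  | nil => simp
  | cons a t ih =>
    rw [List.foldl_cons]
    by_cases h : p a
    · rw [if_pos h, ih]
      simp only [List.countP_cons, h, Prod.mk.injEq]
      constructor <;> (simp; try omega)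
    · rw [if_neg h, ih]
      simp only [List.countP_cons, h, Prod.mk.injEq]
      constructor <;> (simp; try omega)

-- B's partitioning loop: the two buckets are the corresponding filters.
theorem foldB_gen (p1 p0 : String → Bool) (hdisj : ∀ r, p1 r = true → p0 r = false)
    (l : List String) (L1 L0 : List String) :
    l.foldl (fun (acc : List String × List String) row =>
        if p1 row then (acc.1 ++ [row], acc.2)
        else if p0 row then (acc.1, acc.2 ++ [row])
        else acc) (L1, L0)
    = (L1 ++ l.filter p1, L0 ++ l.filter p0) := by
  induction l generalizing L1 L0 with
  | nil => simp
  | cons a t ih =>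
    rw [List.foldl_cons]
    by_cases h1 : p1 a
    · rw [if_pos h1, ih]
      simp [h1, hdisj a h1]
    · rw [if_neg h1]
      by_cases h0 : p0 a
      · rw [if_pos h0, ih]
        simp [h1, h0]
      · rw [if_neg h0, ih]
        simp [h1, h0]

-- countP of a predicate plus countP of its negation is the length.
theorem countP_split (p : String → Bool) (l : List String) :
    l.countP p + l.countP (fun r => !(p r)) = l.length := by
  induction l with
  | nil => simp
  | cons a t ih =>
    simp only [List.countP_cons, List.length_cons]
    by_cases h : p a <;> simp [h] <;> omega

-- ===== VERDICT (by name: the statement is the Claim_ definition above) =====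
theorem ones_zeros_winner_oxygen_spec : Claim_equal_ones_zeros_winner_oxygen := by
  intro lst INDEX _ _
  unfold Spec_ones_zeros_winner_oxygen ones_zeros_winner_oxygen ones_zeros_winner_oxygen_alt
  cases lst.head? with
  | none => rfl
  | some h =>
    simp only
    by_cases hgt : INDEX > PySem.Str.len h - 1
    · rw [if_pos hgt, if_pos hgt]
    · rw [if_neg hgt, if_neg hgt]
      have hdisj : ∀ r : String, (PySem.Str.pyGet? r INDEX == some '1') = true →
          (PySem.Str.pyGet? r INDEX == some '0') = false := by
        intro r hr
        rw [beq_iff_eq] at hr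
        rw [hr]
        decide
      rw [foldA_gen (fun row => PySem.Str.pyGet? row INDEX == some '1') lst 0 0,
          foldB_gen (fun row => PySem.Str.pyGet? row INDEX == some '1')
                    (fun row => PySem.Str.pyGet? row INDEX == some '0') hdisj lst [] []]
      simp only [List.nil_append, zero_add, filter_stuff]
      have hsplit := countP_split (fun row => PySem.Str.pyGet? row INDEX == some '1') lst
      have hlen : (lst.filter (fun row => PySem.Str.pyGet? row INDEX == some '1')).length
          = lst.countP (fun row => PySem.Str.pyGet? row INDEX == some '1') :=
        List.countP_eq_length_filter.symm
      split_ifs with hA hB hB <;> first | rfl | (exfalso; push_cast at hA; omega)
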